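-- pv_equiv track=rewrite | github.com/BrettGoreham/AdventOfCode2020 | day14/dayFourteen.py | get_all_binary_strings
-- ===== SOURCE A (Python) =====
-- def get_all_binary_strings(s, set_of_strings, index):
--     if len(s) <= index:
--         return set_of_strings
--
--     new_strings = []
--     if s[index] != 'X':
--         for stringToAdd in set_of_strings:
--             stringToAdd += s[index]
--             new_strings.append(stringToAdd)
--         return get_all_binary_strings(s, new_strings, index + 1)
--     else:
--         for stringToAdd in set_of_strings:
--             stringToAdd += '1'
--             new_strings.append(stringToAdd)
--         for stringToAdd in set_of_strings:
--             stringToAdd += '0'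
--             new_strings.append(stringToAdd)
--
--         return get_all_binary_strings(s, new_strings, index + 1)
-- ===== SOURCE B (Python) =====
-- # Iterative rewrite: a single left-to-right loop over the indices with list
-- # comprehensions, instead of tail recursion with explicit append loops.
-- def get_all_binary_strings(s, set_of_strings, index):
--     current = set_of_strings
--     for i in range(index, len(s)):
--         c = s[i]
--         if c != 'X':
--             current = [t + c for t in current]
--         else:
--             current = [t + '1' for t in current] + [t + '0' for t in current]
--     return current
-- ===== Notes on version B (the rewrite author's own statement) =====
-- stated objective: simpler
-- what changed: Tail recursion with explicit append loops replaced by one iterative for-loop over the remaining indices that rebuilds the list with comprehensions (map for a fixed bit, 1-batch then 0-batch concatenation for 'X').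
import Mathlib
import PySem

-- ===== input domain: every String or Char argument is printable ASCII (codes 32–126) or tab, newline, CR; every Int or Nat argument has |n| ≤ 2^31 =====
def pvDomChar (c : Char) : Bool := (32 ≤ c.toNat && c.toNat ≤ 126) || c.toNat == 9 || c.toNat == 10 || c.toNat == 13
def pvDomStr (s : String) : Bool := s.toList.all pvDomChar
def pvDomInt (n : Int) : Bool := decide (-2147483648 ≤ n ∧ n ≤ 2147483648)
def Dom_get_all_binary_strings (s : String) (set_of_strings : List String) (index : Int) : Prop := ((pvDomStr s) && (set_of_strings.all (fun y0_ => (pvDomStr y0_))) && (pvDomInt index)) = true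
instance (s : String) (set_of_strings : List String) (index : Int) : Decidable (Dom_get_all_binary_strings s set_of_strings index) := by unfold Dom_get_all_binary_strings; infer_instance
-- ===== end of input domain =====

-- B replaces A's tail recursion (with explicit append loops) by a single iterative
-- fold over the remaining indices, rebuilding the list with maps; objective: simpler.

-- ===== PORT A =====
def get_all_binary_strings (s : String) (set_of_strings : List String) (index : Int) : List String :=
  if (s.toList.length : Int) ≤ index then set_of_strings
  else
    match PySem.Str.pyGet? s index with
    | none => []   -- Python raises IndexError here; excluded by Pre_
    | some c =>
      if c ≠ 'X' then
        get_all_binary_strings s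
          (set_of_strings.foldl (fun acc t => acc ++ [t ++ c.toString]) []) (index + 1)
      else
        get_all_binary_strings s
          (set_of_strings.foldl (fun acc t => acc ++ [t ++ "0"])
            (set_of_strings.foldl (fun acc t => acc ++ [t ++ "1"]) [])) (index + 1)
termination_by (s.toList.length - index).toNat
decreasing_by
  all_goals simp_all

-- ===== PORT B =====
def get_all_binary_strings_alt (s : String) (set_of_strings : List String) (index : Int) : List String :=
  (PySem.List.pyRange index (s.toList.length : Int) 1).foldl
    (fun current i =>
      match PySem.Str.pyGet? s i with
      | none => []   -- Python raises IndexError here; excluded by Pre_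
      | some c =>
        if c ≠ 'X' then current.map (fun t => t ++ c.toString)
        else current.map (fun t => t ++ "1") ++ current.map (fun t => t ++ "0"))
    set_of_strings

-- ===== PRECONDITION & SPEC =====
-- Pre_ excludes exactly the inputs where Python A raises IndexError: index < -len(s) with the
-- initial (negative-wrapped) lookup s[index] out of range.
def Pre_get_all_binary_strings (s : String) (set_of_strings : List String) (index : Int) : Prop :=
  -(s.toList.length : Int) ≤ index
instance (s : String) (set_of_strings : List String) (index : Int) : Decidable (Pre_get_all_binary_strings s set_of_strings index) := by unfold Pre_get_all_binary_strings; infer_instance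

def pvWitness_get_all_binary_strings : String × List String × Int := ("1X0", ["a", ""], 0)

def Spec_get_all_binary_strings (s : String) (set_of_strings : List String) (index : Int) (out : List String) : Prop := out = get_all_binary_strings_alt s set_of_strings index
instance (s : String) (set_of_strings : List String) (index : Int) (out : List String) : Decidable (Spec_get_all_binary_strings s set_of_strings index out) := by unfold Spec_get_all_binary_strings; infer_instance

-- ===== CLAIM (what is proved, stated in full; the proofs are below) =====
def Claim_equal_get_all_binary_strings : Prop := ∀ (s : String) (set_of_strings : List String) (index : Int), Dom_get_all_binary_strings s set_of_strings index → Pre_get_all_binary_strings s set_of_strings index → Spec_get_all_binary_strings s set_of_strings index (get_all_binary_strings s set_of_strings index)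

-- ===== LEMMAS AND PROOFS =====

-- A's append-loop equals a map.
theorem pv_foldl_append_map (f : String → String) (xs l0 : List String) :
    xs.foldl (fun acc t => acc ++ [f t]) l0 = l0 ++ xs.map f := by
  induction xs generalizing l0 with
  | nil => simp
  | cons x xs ih => simp [List.foldl, ih]

theorem pv_main (s : String) (n : Nat) :
    ∀ (index : Int) (sos : List String),
      ((s.toList.length : Int) - index).toNat = n →
      -(s.toList.length : Int) ≤ index →
      get_all_binary_strings s sos index = get_all_binary_strings_alt s sos index := by
  induction n with
  | zero =>
    intro index sos hn _
    have hle : (s.toList.length : Int) ≤ index := by omega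
    rw [get_all_binary_strings, if_pos hle]
    unfold get_all_binary_strings_alt
    rw [PySem.List.pyRange_one_eq_nil hle]
    simp
  | succ n ih =>
    intro index sos hn hpre
    have hlt : index < (s.toList.length : Int) := by omega
    have hsome : ∃ c, PySem.Str.pyGet? s index = some c := by
      rcases h : PySem.Str.pyGet? s index with _ | c
      · exfalso
        have := (PySem.List.pyGet?_eq_none_iff (xs := s.toList) (i := index)).mp (by
          simpa [PySem.Str.pyGet?] using h)
        exact this ⟨hpre, hlt⟩
      · exact ⟨c, rfl⟩
    rcases hsome with ⟨c, hc⟩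
    rw [get_all_binary_strings, if_neg (by omega), hc]
    unfold get_all_binary_strings_alt
    rw [PySem.List.pyRange_one_cons hlt]
    rw [List.foldl_cons, hc]
    have hrec : ∀ sos', get_all_binary_strings s sos' (index + 1) =
        get_all_binary_strings_alt s sos' (index + 1) :=
      fun sos' => ih (index + 1) sos' (by omega) (by omega)
    by_cases hX : c = 'X'
    · simp only [hX, ne_eq, not_true_eq_false, if_false]
      rw [pv_foldl_append_map, pv_foldl_append_map, List.nil_append, hrec]
      rfl
    · simp only [ne_eq, hX, not_false_eq_true, if_true]
      rw [pv_foldl_append_map, List.nil_append, hrec]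
      rfl

-- ===== VERDICT (by name: the statement is the Claim_ definition above) =====
theorem get_all_binary_strings_spec : Claim_equal_get_all_binary_strings := by
  intro s sos index _ hpre
  unfold Spec_get_all_binary_strings
  exact pv_main s ((s.toList.length : Int) - index).toNat index sos rfl hpre
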